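-- pv_equiv track=rewrite | github.com/LuxiaSL/promptweaver | apeiron/tools/profile_templates.py | compute_theoretical_combinations
-- ===== SOURCE A (Python) =====
-- def compute_theoretical_combinations(
--     slots: list[tuple[str, int, str]],
--     components: dict[str, list[str]],
-- ) -> int:
--     """Total possible unique prompts for a template."""
--     # Group slots by category to handle multi-use (e.g., {material_substance} twice)
--     cat_needs: dict[str, int] = {}
--     for cat, count, _ in slots:
--         cat_needs[cat] = cat_needs.get(cat, 0) + count
--
--     total = 1
--     for cat, needed in cat_needs.items():
--         n = len(components.get(cat, []))
--         perm = 1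
--         for i in range(needed):
--             perm *= max(1, n - i)
--         total *= perm
--     return total
-- ===== SOURCE B (Python) =====
-- def compute_theoretical_combinations(
--     slots: list[tuple[str, int, str]],
--     components: dict[str, list[str]],
-- ) -> int:
--     """Total possible unique prompts for a template."""
--     # Recursive decomposition: peel off the first slot's category, take the
--     # falling factorial for its total use count, recurse on the other categories.
--     if not slots:
--         return 1
--     c = slots[0][0]
--     needed = sum(cnt for cat, cnt, _ in slots if cat == c)
--     n = len(components.get(c, []))
--     return _falling(n, needed) * compute_theoretical_combinations(
--         [s for s in slots if s[0] != c], components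
--     )
--
--
-- def _falling(n: int, k: int) -> int:
--     """max(1, n) * max(1, n-1) * ... , k factors (1 if k <= 0)."""
--     result = 1
--     while k > 0:
--         result *= max(1, n)
--         n -= 1
--         k -= 1
--     return result
-- ===== Notes on version B (the rewrite author's own statement) =====
-- stated objective: alternative
-- what changed: Replaces the grouping-dict-then-product structure by a recursion that peels off the first slot's category, takes the falling factorial of its summed count directly (itself recursive instead of a range loop), and recurses on the slots of the remaining categories.
import Mathlib
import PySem

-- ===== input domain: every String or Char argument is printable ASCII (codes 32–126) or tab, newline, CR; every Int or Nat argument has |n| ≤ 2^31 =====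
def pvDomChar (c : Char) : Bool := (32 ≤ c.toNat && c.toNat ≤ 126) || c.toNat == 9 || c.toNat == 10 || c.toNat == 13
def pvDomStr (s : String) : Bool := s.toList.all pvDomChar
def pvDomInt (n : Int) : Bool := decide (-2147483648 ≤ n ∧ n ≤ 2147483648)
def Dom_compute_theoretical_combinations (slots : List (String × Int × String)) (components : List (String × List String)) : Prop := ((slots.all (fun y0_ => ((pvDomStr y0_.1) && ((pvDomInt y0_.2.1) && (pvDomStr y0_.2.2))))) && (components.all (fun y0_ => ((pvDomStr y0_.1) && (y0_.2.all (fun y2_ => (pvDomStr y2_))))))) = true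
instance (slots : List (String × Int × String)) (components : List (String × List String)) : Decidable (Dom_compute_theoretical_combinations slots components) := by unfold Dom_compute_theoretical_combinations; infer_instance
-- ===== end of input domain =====

-- B replaces A's grouping-dict pass followed by a range-loop product per category by a recursion
-- that peels one category at a time and computes its falling factorial recursively (alternative decomposition).


-- ===== PORT A =====
def compute_theoretical_combinations (slots : List (String × Int × String)) (components : List (String × List String)) : Int :=
  -- cat_needs: dict[str, int], built by the first for-loop
  let cat_needs : PySem.Dict String Int :=
    slots.foldl (fun d s => d.insert s.1 (d.getD s.1 0 + s.2.1)) PySem.Dict.empty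
  -- second for-loop over cat_needs.items(), inner loop over range(needed)
  cat_needs.items.foldl
    (fun total p =>
      let n : Int := ((PySem.Dict.mk components).getD p.1 []).length
      let perm : Int := (PySem.List.pyRange 0 p.2 1).foldl (fun q i => q * max 1 (n - i)) 1
      total * perm)
    1

-- ===== PORT B =====
-- the while-loop of _falling(n, k): result accumulator
def pvFallingLoop (n k result : Int) : Int :=
  if 0 < k then pvFallingLoop (n - 1) (k - 1) (result * max 1 n) else result
termination_by k.toNat
decreasing_by omega

-- _falling(n, k): k factors max(1, n), max(1, n-1), ... (1 if k <= 0)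
def pvFalling (n k : Int) : Int := pvFallingLoop n k 1

def compute_theoretical_combinations_alt (slots : List (String × Int × String)) (components : List (String × List String)) : Int :=
  match slots with
  | [] => 1
  | s :: tl =>
    let c := s.1
    let needed : Int := (((s :: tl).filter (fun t => t.1 == c)).map (fun t => t.2.1)).sum
    let n : Int := ((PySem.Dict.mk components).getD c []).length
    pvFalling n needed *
      compute_theoretical_combinations_alt ((s :: tl).filter (fun t => t.1 != c)) components
termination_by slots.length
decreasing_by
  simp only [List.filter_cons, bne_self_eq_false]
  exact Nat.lt_succ_of_le (List.length_filter_le _ _)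

-- ===== PRECONDITION & SPEC =====
def Spec_compute_theoretical_combinations (slots : List (String × Int × String)) (components : List (String × List String)) (out : Int) : Prop := out = compute_theoretical_combinations_alt slots components
instance (slots : List (String × Int × String)) (components : List (String × List String)) (out : Int) : Decidable (Spec_compute_theoretical_combinations slots components out) := by unfold Spec_compute_theoretical_combinations; infer_instance

-- ===== CLAIM (what is proved, stated in full; the proofs are below) =====
def Claim_equal_compute_theoretical_combinations : Prop := ∀ (slots : List (String × Int × String)) (components : List (String × List String)), Dom_compute_theoretical_combinations slots components → Spec_compute_theoretical_combinations slots components (compute_theoretical_combinations slots components)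

-- ===== LEMMAS AND PROOFS =====

lemma pvFallingLoop_acc (n k acc : Int) : pvFallingLoop n k acc = acc * pvFallingLoop n k 1 := by
  induction hm : k.toNat generalizing n k acc with
  | zero =>
    have h : ¬ 0 < k := by omega
    conv_lhs => rw [pvFallingLoop]
    conv_rhs => rw [pvFallingLoop]
    simp [h]
  | succ m ih =>
    have hk : 0 < k := by omega
    conv_lhs => rw [pvFallingLoop]
    conv_rhs => rw [pvFallingLoop]
    simp only [hk, if_true]
    rw [ih (n - 1) (k - 1) (acc * max 1 n) (by omega), ih (n - 1) (k - 1) (1 * max 1 n) (by omega)]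
    ring

lemma pvFalling_nonpos (n k : Int) (h : k ≤ 0) : pvFalling n k = 1 := by
  rw [pvFalling, pvFallingLoop]; simp [show ¬ (0 < k) by omega]

lemma pvFalling_step (n k : Int) (h : 0 < k) : pvFalling n k = max 1 n * pvFalling (n - 1) (k - 1) := by
  rw [pvFalling, pvFallingLoop]
  simp only [h, if_true]
  rw [pvFallingLoop_acc]
  unfold pvFalling
  ring

lemma pvFalling_succ (n k : Int) (hk : 0 ≤ k) : pvFalling n (k + 1) = pvFalling n k * max 1 (n - k) := by
  induction hm : k.toNat generalizing n k with
  | zero =>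
    have : k = 0 := by omega
    subst this
    rw [show (0 : Int) + 1 = 1 by norm_num, pvFalling_step n 1 one_pos,
        pvFalling_nonpos (n - 1) (1 - 1) (by omega), pvFalling_nonpos n 0 le_rfl]
    ring_nf
  | succ m ih =>
    have h1 : 0 ≤ k - 1 := by omega
    have e1 : pvFalling n (k + 1) = max 1 n * pvFalling (n - 1) k := by
      rw [pvFalling_step n (k + 1) (by omega)]; ring_nf
    have e2 : pvFalling n k = max 1 n * pvFalling (n - 1) (k - 1) :=
      pvFalling_step n k (by omega)
    have e3 := ih (n - 1) (k - 1) h1 (by omega)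
    rw [show k - 1 + 1 = k by omega] at e3
    rw [e1, e2, e3, show n - 1 - (k - 1) = n - k by omega]
    ring

-- A's inner range-product equals B's recursive falling factorial.
lemma falling_eq_range_prod (n k : Int) :
    (PySem.List.pyRange 0 k 1).foldl (fun q i => q * max 1 (n - i)) 1 = pvFalling n k := by
  induction hm : k.toNat generalizing k with
  | zero =>
    rw [PySem.List.pyRange_one_eq_nil (by omega), pvFalling_nonpos _ _ (by omega)]
    rfl
  | succ m ih =>
    have hk : 0 ≤ k - 1 := by omega
    rw [show k = (k - 1) + 1 by omega, PySem.List.pyRange_one_succ_right (by omega),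
        List.foldl_append, ih (k - 1) (by omega), pvFalling_succ n (k - 1) hk]
    rfl

-- getD of A's grouping fold is the sum of the matching counts.
lemma getD_build (l : List (String × Int × String)) (d : PySem.Dict String Int) (c : String) :
    (l.foldl (fun d s => d.insert s.1 (d.getD s.1 0 + s.2.1)) d).getD c 0
      = d.getD c 0 + ((l.filter (fun t => t.1 == c)).map (fun t => t.2.1)).sum := by
  induction l generalizing d with
  | nil => simp
  | cons a t ih =>
    simp only [List.foldl_cons, List.filter_cons, ih]
    rw [PySem.Dict.getD_insert]
    by_cases h : a.1 = c
    · subst h; simp; ring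
    · have hb : (a.1 == c) = false := by simpa using h
      simp [hb, Ne.symm h]

-- A's outer loop with a multiplying accumulator is a product of a map.
lemma foldl_mul_eq_prod (f : String × Int → Int) (l : List (String × Int)) (a : Int) :
    l.foldl (fun t p => t * f p) a = a * (l.map f).prod := by
  induction l generalizing a with
  | nil => simp
  | cons x t ih => simp [ih]; ring

-- PySem first-occurrence dedup peels the head element.
lemma dedup_cons (a : String) (l : List String) :
    PySem.List.dedup (a :: l) = a :: (PySem.List.dedup l).filter (fun y => y != a) := by
  have h1 : PySem.List.dedup (a :: l) = PySem.Set.ofList ([a] ++ l) := rfl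
  rw [h1, PySem.Set.ofList_append, PySem.Set.update_eq_append_filter]
  have h2 : PySem.Set.ofList [a] = [a] := rfl
  rw [h2]
  simp only [PySem.Set.contains, PySem.List.dedup, List.cons_append, List.nil_append]
  congr 1
  apply List.filter_congr
  intro y _
  by_cases h : y = a <;> simp [h, bne]

-- first-occurrence dedup commutes with filter.
lemma dedup_filter (p : String → Bool) (l : List String) :
    PySem.List.dedup (l.filter p) = (PySem.List.dedup l).filter p := by
  induction l with
  | nil => rfl
  | cons a t ih =>
    rw [List.filter_cons, dedup_cons]
    by_cases h : p a = true
    · simp only [h, if_true, dedup_cons, ih, List.filter_cons, List.filter_filter]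
      congr 1
      apply List.filter_congr
      intro y _
      exact Bool.and_comm _ _
    · have h' : p a = false := by simpa using h
      simp only [h', Bool.false_eq_true, if_false, ih, List.filter_cons, List.filter_filter]
      apply List.filter_congr
      intro y _
      by_cases hy : y = a
      · subst hy; simp [h']
      · simp [hy, bne]

-- canonical form both ports are reduced to: product over the first-occurrence-deduped
-- category list of the falling factorial of the summed count.
def catS (slots : List (String × Int × String)) (c : String) : Int :=
  ((slots.filter (fun t => t.1 == c)).map (fun t => t.2.1)).sum

def catF (components : List (String × List String)) (slots : List (String × Int × String)) (c : String) : Int :=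
  pvFalling (((PySem.Dict.mk components).getD c []).length : Int) (catS slots c)

def canon (slots : List (String × Int × String)) (components : List (String × List String)) : Int :=
  ((PySem.List.dedup (slots.map (fun s => s.1))).map (catF components slots)).prod

lemma A_eq_canon (slots : List (String × Int × String)) (components : List (String × List String)) :
    compute_theoretical_combinations slots components = canon slots components := by
  simp only [compute_theoretical_combinations]
  set build := slots.foldl (fun d s => d.insert s.1 (d.getD s.1 0 + s.2.1)) PySem.Dict.empty with hb
  have hnodup : build.keys.Nodup := by
    rw [hb]
    exact PySem.Dict.nodup_keys_foldl_insert_key slots (fun s => s.1)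
      (fun d s => d.getD s.1 0 + s.2.1) PySem.Dict.empty (by simp)
  have hkeys : build.keys = PySem.List.dedup (slots.map (fun s => s.1)) := by
    rw [hb, PySem.Dict.keys_foldl_insert_key]
    simp [PySem.Dict.keys_empty, PySem.Set.update_nil_left, PySem.List.dedup]
  rw [PySem.Dict.items_eq_map_keys build hnodup 0,
      foldl_mul_eq_prod (f := fun p => (PySem.List.pyRange 0 p.2 1).foldl
        (fun q i => q * max 1 ((((PySem.Dict.mk components).getD p.1 []).length : Int) - i)) 1),
      one_mul, List.map_map, canon, hkeys]
  apply congrArg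
  apply List.map_congr_left
  intro c _
  simp only [Function.comp]
  rw [falling_eq_range_prod, hb, getD_build]
  simp [PySem.Dict.getD_empty, catF, catS]

lemma map_fst_filter (p : String → Bool) (l : List (String × Int × String)) :
    ((l.filter (fun t => p t.1)).map (fun t => t.1)) = (l.map (fun t => t.1)).filter p := by
  induction l with
  | nil => rfl
  | cons a t ih => by_cases h : p a.1 <;> simp [h, ih]

lemma catS_filter (slots : List (String × Int × String)) (a c : String) (h : c ≠ a) :
    catS (slots.filter (fun t => t.1 != a)) c = catS slots c := by
  simp only [catS, List.filter_filter]
  congr 2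
  apply List.filter_congr
  intro t _
  by_cases ht : t.1 = c
  · simp [ht, bne]; exact h
  · simp [ht]

theorem B_eq_canon (slots : List (String × Int × String)) (components : List (String × List String)) :
    compute_theoretical_combinations_alt slots components = canon slots components := by
  match slots with
  | [] => simp [compute_theoretical_combinations_alt, canon]
  | s :: tl =>
    have IH := B_eq_canon ((s :: tl).filter (fun t => t.1 != s.1)) components
    rw [compute_theoretical_combinations_alt, IH]
    have hrest : (s :: tl).filter (fun t => t.1 != s.1) = tl.filter (fun t => t.1 != s.1) := by
      simp
    rw [hrest]
    simp only [canon, List.map_cons, dedup_cons]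
    rw [map_fst_filter (fun y => y != s.1) tl, dedup_filter, List.prod_cons]
    congr 1
    · apply congrArg
      apply List.map_congr_left
      intro y hy
      have hne : y ≠ s.1 := by
        have h2 := (List.mem_filter.mp hy).2
        simpa [bne] using h2
      simp only [catF, catS_filter tl s.1 y hne]
      have hcs : catS (s :: tl) y = catS tl y := by
        simp only [catS, List.filter_cons]
        have : (s.1 == y) = false := by simpa using Ne.symm hne
        simp [this]
      rw [hcs]
termination_by slots.length
decreasing_by
  simp only [List.filter_cons, bne_self_eq_false]
  exact Nat.lt_succ_of_le (List.length_filter_le _ _)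

-- ===== VERDICT (by name: the statement is the Claim_ definition above) =====
theorem compute_theoretical_combinations_spec : Claim_equal_compute_theoretical_combinations := by
  intro slots components _
  unfold Spec_compute_theoretical_combinations
  rw [A_eq_canon, B_eq_canon]
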